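-- pv_equiv track=rewrite | github.com/zhangxinnan123/Verbduration-extract | raw_to_label.py | num_to_continuous
-- ===== SOURCE A (Python) =====
-- def num_to_continuous(num_list):
--     if len(num_list) > 1:
--         num_list = sorted(num_list)
--         for i in range(0, num_list[-1] - num_list[0]):
--             if num_list[0]+i not in num_list:
--                 num_list.append(num_list[0]+i)
--     num_list = sorted(num_list)
--     return num_list
-- ===== SOURCE B (Python) =====
-- def num_to_continuous(num_list):
--     s = sorted(num_list)
--     if len(s) <= 1:
--         return s
--     out = []
--     for j in range(len(s)):
--         out.append(s[j])
--         if j + 1 < len(s):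
--             out.extend(range(s[j] + 1, s[j + 1]))
--     return out
-- ===== Notes on version B (the rewrite author's own statement) =====
-- stated objective: faster
-- what changed: Replaces A's scan over every integer between min and max with a repeated linear membership test (plus a second sort) by one sort followed by a single left-to-right pass over the sorted list that emits each element and fills the gap to its successor with a range, producing the already-sorted result directly.
import Mathlib
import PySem

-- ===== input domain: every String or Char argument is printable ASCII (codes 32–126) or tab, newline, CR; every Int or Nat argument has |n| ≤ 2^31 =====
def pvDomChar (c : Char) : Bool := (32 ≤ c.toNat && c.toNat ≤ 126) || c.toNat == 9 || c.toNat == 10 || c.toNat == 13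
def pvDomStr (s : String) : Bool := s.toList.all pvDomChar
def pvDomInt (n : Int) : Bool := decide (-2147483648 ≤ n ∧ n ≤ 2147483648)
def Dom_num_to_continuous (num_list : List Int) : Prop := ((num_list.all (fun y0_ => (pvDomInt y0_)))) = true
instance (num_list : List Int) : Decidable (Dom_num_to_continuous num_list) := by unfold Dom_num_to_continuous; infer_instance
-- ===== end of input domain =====

-- B replaces A's per-integer membership scan between min and max by one sorted
-- left-to-right gap-filling pass (objective: faster).

-- ===== PORT A =====
-- literal transliteration of A: sort; for i in range(0, s[-1]-s[0]): append s[0]+i if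
-- not already in the (growing) list; sort the result.  The indexings s[0], s[-1] occur
-- only with length > 1, so pyGetD's default is never used.
def num_to_continuous (num_list : List Int) : List Int :=
  if num_list.length > 1 then
    let s := PySem.List.sorted num_list (fun x => x) false
    let first := PySem.List.pyGetD s 0 0
    let last := PySem.List.pyGetD s (-1) 0
    PySem.List.sorted
      ((PySem.List.pyRange 0 (last - first) 1).foldl
        (fun acc i => if (first + i) ∈ acc then acc else acc ++ [first + i]) s)
      (fun x => x) false
  else
    PySem.List.sorted num_list (fun x => x) false

-- ===== PORT B =====
-- the single pass of Source B over the sorted list: emit s[j], then the gap range(s[j]+1, s[j+1])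
def fillGaps : List Int → List Int
  | [] => []
  | [a] => [a]
  | a :: b :: t => a :: (PySem.List.pyRange (a + 1) b 1 ++ fillGaps (b :: t))

def num_to_continuous_alt (num_list : List Int) : List Int :=
  let s := PySem.List.sorted num_list (fun x => x) false
  if s.length ≤ 1 then s else fillGaps s

-- ===== PRECONDITION & SPEC =====
def Spec_num_to_continuous (num_list : List Int) (out : List Int) : Prop := out = num_to_continuous_alt num_list
instance (num_list : List Int) (out : List Int) : Decidable (Spec_num_to_continuous num_list out) := by unfold Spec_num_to_continuous; infer_instance

-- ===== CLAIM (what is proved, stated in full; the proofs are below) =====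
def Claim_equal_num_to_continuous : Prop := ∀ (num_list : List Int), Dom_num_to_continuous num_list → Spec_num_to_continuous num_list (num_to_continuous num_list)

-- ===== LEMMAS AND PROOFS =====

-- A's append loop builds exactly s followed by the integers of [first+k, first+n) missing from s.
theorem fold_char (first : Int) : ∀ (fuel : Nat) (k n : Int), (n - k).toNat = fuel →
    ∀ (s pre : List Int), (∀ x ∈ pre, x < first + k) →
    (PySem.List.pyRange k n 1).foldl
        (fun acc i => if (first + i) ∈ acc then acc else acc ++ [first + i]) (s ++ pre)
      = s ++ pre ++ (((PySem.List.pyRange k n 1).filter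
          (fun i => decide ((first + i) ∉ s))).map (fun i => first + i)) := by
  intro fuel
  induction fuel with
  | zero =>
    intro k n hf s pre hpre
    rw [PySem.List.pyRange_one_eq_nil (by omega)]
    simp
  | succ m ih =>
    intro k n hf s pre hpre
    rw [PySem.List.pyRange_one_cons (by omega)]
    simp only [List.foldl_cons, List.filter_cons]
    by_cases hmem : (first + k) ∈ s
    · have hm : (first + k) ∈ s ++ pre := List.mem_append_left _ hmem
      rw [if_pos hm]
      have := ih (k + 1) n (by omega) s pre (fun x hx => by have := hpre x hx; omega)
      rw [this]
      simp [hmem]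
    · have hm : (first + k) ∉ s ++ pre := by
        intro h
        rcases List.mem_append.mp h with h | h
        · exact hmem h
        · have := hpre _ h; omega
      rw [if_neg hm]
      have hacc : s ++ pre ++ [first + k] = s ++ (pre ++ [first + k]) := by
        simp
      rw [hacc]
      have := ih (k + 1) n (by omega) s (pre ++ [first + k])
        (fun x hx => by
          rcases List.mem_append.mp hx with h | h
          · have := hpre x h; omega
          · simp at h; omega)
      rw [this]
      simp [hmem]

-- reindex the missing-value list to a filter over the value range [first, last)
theorem missing_reindex (first n : Int) (s : List Int) :
    ((PySem.List.pyRange 0 n 1).filter (fun i => decide ((first + i) ∉ s))).map (fun i => first + i)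
      = (PySem.List.pyRange first (first + n) 1).filter (fun v => decide (v ∉ s)) := by
  rw [PySem.List.pyRange_one 0 n, PySem.List.pyRange_one first (first + n)]
  have h1 : n - 0 = n := by ring
  have h2 : first + n - first = n := by ring
  rw [h1, h2]
  rw [List.filter_map, List.filter_map]
  simp [Function.comp_def]

-- count of v in the gap-filled list: one extra occurrence exactly when v lies strictly
-- inside the span of the sorted list and is missing from it
theorem count_fillGaps : ∀ (t : List Int) (a : Int), (a :: t).Pairwise (· ≤ ·) → ∀ v : Int,
    (fillGaps (a :: t)).count v
      = (a :: t).count v + (if a ≤ v ∧ v < (a :: t).getLast (by simp) ∧ v ∉ a :: t then 1 else 0) := by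
  intro t
  induction t with
  | nil =>
    intro a _ v
    simp [fillGaps]
    omega
  | cons b t ih =>
    intro a hp v
    have hab : a ≤ b := by
      rcases List.pairwise_cons.mp hp with ⟨h1, _⟩
      exact h1 b (by simp)
    have hpt : (b :: t).Pairwise (· ≤ ·) := (List.pairwise_cons.mp hp).2
    have hble : ∀ x ∈ b :: t, b ≤ x := by
      intro x hx
      rcases List.mem_cons.mp hx with h | h
      · omega
      · exact List.rel_of_pairwise_cons hpt h
    have hlast : (a :: b :: t).getLast (by simp) = (b :: t).getLast (by simp) := by
      simp [List.getLast]
    have hLmem : (b :: t).getLast (by simp) ∈ b :: t := List.getLast_mem _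
    have hbL : b ≤ (b :: t).getLast (by simp) := hble _ hLmem
    have hrange : (PySem.List.pyRange (a + 1) b 1).count v
        = if a + 1 ≤ v ∧ v < b then 1 else 0 := by
      by_cases hv : a + 1 ≤ v ∧ v < b
      · rw [if_pos hv]
        exact List.count_eq_one_of_mem (PySem.List.nodup_pyRange_one _ _)
          (PySem.List.mem_pyRange_one.mpr hv)
      · rw [if_neg hv]
        exact List.count_eq_zero_of_not_mem (fun h => hv (PySem.List.mem_pyRange_one.mp h))
    have hrec := ih b hpt v
    show (a :: (PySem.List.pyRange (a + 1) b 1 ++ fillGaps (b :: t))).count v = _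
    rw [List.count_cons, List.count_append, hrange, hrec, hlast]
    by_cases hvb : v ∈ b :: t
    · have hbv : b ≤ v := hble v hvb
      simp only [List.count_cons]
      have h1 : ¬ (a + 1 ≤ v ∧ v < b) := by omega
      have h2 : v ∉ b :: t → False := fun h => h hvb
      have hno : ¬ (b ≤ v ∧ v < (b :: t).getLast (by simp) ∧ v ∉ b :: t) := fun ⟨_, _, h⟩ => h hvb
      have hno2 : ¬ (a ≤ v ∧ v < (b :: t).getLast (by simp) ∧ v ∉ a :: b :: t) := by
        rintro ⟨_, _, h⟩; exact h (List.mem_cons_of_mem _ hvb)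
      rw [if_neg h1, if_neg hno, if_neg hno2]
      omega
    · simp only [List.count_cons]
      have hvcount : (b :: t).count v = 0 := List.count_eq_zero_of_not_mem hvb
      have hvnb : v ≠ b := fun h => hvb (h ▸ List.mem_cons_self)
      by_cases hva : v = a
      · subst hva
        have h1 : ¬ (v + 1 ≤ v ∧ v < b) := by omega
        have hno : ¬ (b ≤ v ∧ v < (b :: t).getLast (by simp) ∧ v ∉ b :: t) := by
          rintro ⟨h, _, _⟩
          exact hvb ((hab.antisymm h) ▸ List.mem_cons_self)
        have hno2 : ¬ (v ≤ v ∧ v < (b :: t).getLast (by simp) ∧ v ∉ v :: b :: t) := by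
          rintro ⟨_, _, h⟩; exact h List.mem_cons_self
        rw [if_neg h1, if_neg hno, if_neg hno2]
        omega
      · have hsplit :
            (if a + 1 ≤ v ∧ v < b then (1:Nat) else 0)
              + (if b ≤ v ∧ v < (b :: t).getLast (by simp) ∧ v ∉ b :: t then (1:Nat) else 0)
            = if a ≤ v ∧ v < (b :: t).getLast (by simp) ∧ v ∉ a :: b :: t then 1 else 0 := by
          have hmem3 : v ∉ a :: b :: t := by
            intro h
            rcases List.mem_cons.mp h with h | h
            · exact hva h
            · exact hvb h
          by_cases hc1 : a + 1 ≤ v ∧ v < b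
          · rw [if_pos hc1, if_neg (by omega), if_pos ⟨by omega, by omega, hmem3⟩]
          · rw [if_neg hc1]
            by_cases hc2 : b ≤ v ∧ v < (b :: t).getLast (by simp) ∧ v ∉ b :: t
            · rw [if_pos hc2, if_pos ⟨by omega, hc2.2.1, hmem3⟩]
            · rw [if_neg hc2, if_neg ?_]
              rintro ⟨hv1, hv2, _⟩
              have hva' : a ≠ v := fun h => hva h.symm
              by_cases hvb' : v < b
              · exact hc1 ⟨by omega, hvb'⟩
              · exact hc2 ⟨by omega, hv2, hvb⟩
        omega

-- the gap-filled list stays sorted and bounded below by its head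
theorem fillGaps_sorted : ∀ (t : List Int) (a : Int), (a :: t).Pairwise (· ≤ ·) →
    (fillGaps (a :: t)).Pairwise (· ≤ ·) ∧ ∀ x ∈ fillGaps (a :: t), a ≤ x := by
  intro t
  induction t with
  | nil => intro a _; constructor <;> simp [fillGaps]
  | cons b t ih =>
    intro a hp
    have hab : a ≤ b := (List.pairwise_cons.mp hp).1 b (by simp)
    have hpt : (b :: t).Pairwise (· ≤ ·) := (List.pairwise_cons.mp hp).2
    obtain ⟨ihs, ihb⟩ := ih b hpt
    have hmemfill : ∀ x ∈ fillGaps (a :: b :: t),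
        x = a ∨ (a + 1 ≤ x ∧ x < b) ∨ x ∈ fillGaps (b :: t) := by
      intro x hx
      rcases List.mem_cons.mp hx with h | h
      · exact Or.inl h
      · rcases List.mem_append.mp h with h | h
        · exact Or.inr (Or.inl (PySem.List.mem_pyRange_one.mp h))
        · exact Or.inr (Or.inr h)
    constructor
    · show (a :: (PySem.List.pyRange (a + 1) b 1 ++ fillGaps (b :: t))).Pairwise (· ≤ ·)
      rw [List.pairwise_cons]
      constructor
      · intro x hx
        rcases List.mem_append.mp hx with h | h
        · have := PySem.List.mem_pyRange_one.mp h; omega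
        · have := ihb x h; omega
      · rw [List.pairwise_append]
        refine ⟨(PySem.List.pairwise_lt_pyRange_one _ _).imp (fun h => le_of_lt h), ihs, ?_⟩
        intro x hx y hy
        have hx' := PySem.List.mem_pyRange_one.mp hx
        have hy' := ihb y hy
        omega
    · intro x hx
      rcases hmemfill x hx with h | h | h
      · omega
      · omega
      · have := ihb x h; omega

theorem num_to_continuous_eq (num_list : List Int) :
    num_to_continuous num_list = num_to_continuous_alt num_list := by
  unfold num_to_continuous num_to_continuous_alt
  have hlen : (PySem.List.sorted num_list (fun x => x) false).length = num_list.length :=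
    (PySem.List.sorted_perm num_list (fun x => x) false).length_eq
  by_cases hl : num_list.length > 1
  · rw [if_pos hl, if_neg (by omega)]
    set s := PySem.List.sorted num_list (fun x => x) false with hs
    have hsne : s ≠ [] := by
      intro h; rw [h] at hlen; simp at hlen; omega
    obtain ⟨a, t, hat⟩ := List.exists_cons_of_ne_nil hsne
    have hsp : s.Pairwise (· ≤ ·) := PySem.List.sorted_pairwise num_list (fun x => x)
    show (PySem.List.sorted
        ((PySem.List.pyRange 0 (PySem.List.pyGetD s (-1) 0 - PySem.List.pyGetD s 0 0) 1).foldl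
          (fun acc i => if (PySem.List.pyGetD s 0 0 + i) ∈ acc then acc
            else acc ++ [PySem.List.pyGetD s 0 0 + i]) s)
        (fun x => x) false) = fillGaps s
    have hfirst : PySem.List.pyGetD s 0 0 = a := by rw [hat]; exact PySem.List.pyGetD_zero_cons a t 0
    have hlastv : PySem.List.pyGetD s (-1) 0 = s.getLast hsne := PySem.List.pyGetD_neg_one s 0 hsne
    rw [hfirst, hlastv]
    set L := s.getLast hsne with hL
    -- characterise A's loop result
    have hfold := fold_char a ((L - a) - 0).toNat 0 (L - a) rfl s [] (by simp)
    simp only [List.append_nil] at hfold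
    rw [hfold]
    rw [missing_reindex a (L - a) s]
    have haL : a + (L - a) = L := by ring
    rw [haL]
    set M := (PySem.List.pyRange a L 1).filter (fun v => decide (v ∉ s)) with hM
    -- B's result is a sorted permutation of s ++ M
    have hsp' : (a :: t).Pairwise (· ≤ ·) := hat ▸ hsp
    have hLat : L = (a :: t).getLast (by simp) := by simp only [hL, hat]
    have hperm : (fillGaps s).Perm (s ++ M) := by
      rw [List.perm_iff_count]
      intro v
      rw [List.count_append]
      have hcM : M.count v = if a ≤ v ∧ v < L ∧ v ∉ s then 1 else 0 := by
        rw [hM]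
        by_cases hv : a ≤ v ∧ v < L ∧ v ∉ s
        · rw [if_pos hv]
          refine List.count_eq_one_of_mem (List.Nodup.filter _ (PySem.List.nodup_pyRange_one _ _)) ?_
          rw [List.mem_filter]
          exact ⟨PySem.List.mem_pyRange_one.mpr ⟨hv.1, hv.2.1⟩, by simpa using hv.2.2⟩
        · rw [if_neg hv]
          refine List.count_eq_zero_of_not_mem ?_
          rw [List.mem_filter]
          rintro ⟨h1, h2⟩
          have := PySem.List.mem_pyRange_one.mp h1
          simp at h2
          exact hv ⟨this.1, this.2, h2⟩
      rw [hcM, hat]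
      rw [count_fillGaps t a hsp' v]
      rw [← hLat, ← hat]
    have hsorted : (fillGaps s).Pairwise (· ≤ ·) := by
      rw [hat]; exact (fillGaps_sorted t a hsp').1
    exact (PySem.List.sorted_id_eq_of_perm_of_pairwise _ _ hperm hsorted)
  · rw [if_neg hl, if_pos (by omega)]

-- ===== VERDICT (by name: the statement is the Claim_ definition above) =====
theorem num_to_continuous_spec : Claim_equal_num_to_continuous := by
  intro num_list _
  exact num_to_continuous_eq num_list
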